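-- pv_equiv track=rewrite | github.com/ruslanmv/PowerPoint-Slides-with-WatsonX | src/backend/utils/pptxgen.py | extract_slides
-- ===== SOURCE A (Python) =====
-- def extract_slides(text):
--     slides = []
--     lines = text.split("\n")
--     current_slide = ""
--
--     for line in lines:
--         if line.startswith("Slide"):
--             if current_slide:
--                 slides.append(current_slide)
--                 current_slide = ""
--             current_slide = line
--         elif current_slide:
--             current_slide += "\n" + line
--
--     if current_slide:
--         slides.append(current_slide)
--
--     return slides
-- ===== SOURCE B (Python) =====
-- def extract_slides(text):
--     lines = text.split("\n")
--     out = []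
--     i = 0
--     n = len(lines)
--     while i < n:
--         if lines[i].startswith("Slide"):
--             j = i + 1
--             while j < n and not lines[j].startswith("Slide"):
--                 j += 1
--             out.append("\n".join(lines[i:j]))
--             i = j
--         else:
--             i += 1
--     return out
-- ===== Notes on version B (the rewrite author's own statement) =====
-- stated objective: simpler
-- what changed: Replaced the stateful current_slide string accumulator (with its flush-on-Slide and flush-at-end logic) by a two-pointer scan that finds each block's start and end in the line list and joins the slice, so no growing string state or final flush is needed.
import Mathlib
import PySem

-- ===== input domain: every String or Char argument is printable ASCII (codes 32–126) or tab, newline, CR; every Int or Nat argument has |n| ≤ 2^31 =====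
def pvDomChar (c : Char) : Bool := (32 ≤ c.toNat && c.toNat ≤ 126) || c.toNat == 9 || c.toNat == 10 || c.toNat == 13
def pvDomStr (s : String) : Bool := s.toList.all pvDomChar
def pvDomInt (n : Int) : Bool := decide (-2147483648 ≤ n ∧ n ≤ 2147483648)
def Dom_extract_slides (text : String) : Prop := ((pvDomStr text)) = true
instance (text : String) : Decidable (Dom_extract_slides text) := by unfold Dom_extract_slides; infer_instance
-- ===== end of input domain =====

-- B replaces A's stateful current_slide accumulator by a two-pointer block scan over the
-- line list that joins each block slice; same O(n) cost, simpler control flow.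

-- ===== PORT A =====
-- A's loop body: state = (slides, current_slide)
def fA (st : List String × String) (line : String) : List String × String :=
  if PySem.Str.startswith line "Slide" then
    (if st.2 ≠ "" then st.1 ++ [st.2] else st.1, line)
  else if st.2 ≠ "" then (st.1, st.2 ++ "\n" ++ line)
  else st

def extract_slides (text : String) : List String :=
  let lines := (PySem.Str.split? text "\n").getD []
  let st := lines.foldl fA ([], "")
  if st.2 ≠ "" then st.1 ++ [st.2] else st.1

-- ===== PORT B =====
-- "\n".join, transliterated by hand
def joinNL : List String → String
  | [] => ""
  | [x] => x
  | x :: y :: xs => x ++ "\n" ++ joinNL (y :: xs)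

-- the inner while loop: the lines strictly between a block's start and the next "Slide" line
def takeBody : List String → List String
  | [] => []
  | x :: xs => if PySem.Str.startswith x "Slide" then [] else x :: takeBody xs

-- the outer while loop over lines[i:]
def goB : List String → List String
  | [] => []
  | x :: xs =>
    if PySem.Str.startswith x "Slide" then
      joinNL (x :: takeBody xs) :: goB (xs.drop (takeBody xs).length)
    else goB xs
termination_by ls => ls.length
decreasing_by
  all_goals (simp; try omega)

def extract_slides_alt (text : String) : List String :=
  goB ((PySem.Str.split? text "\n").getD [])

-- ===== PRECONDITION & SPEC =====
def Spec_extract_slides (text : String) (out : List String) : Prop := out = extract_slides_alt text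
instance (text : String) (out : List String) : Decidable (Spec_extract_slides text out) := by unfold Spec_extract_slides; infer_instance

-- ===== CLAIM (what is proved, stated in full; the proofs are below) =====
def Claim_equal_extract_slides : Prop := ∀ (text : String), Dom_extract_slides text → Spec_extract_slides text (extract_slides text)

-- ===== LEMMAS AND PROOFS =====
def finishA (st : List String × String) : List String :=
  if st.2 ≠ "" then st.1 ++ [st.2] else st.1

theorem startswith_ne_empty (x : String) (h : PySem.Str.startswith x "Slide" = true) : x ≠ "" := by
  intro he; subst he; exact absurd h (by decide)

theorem appendNL_ne_empty (c x : String) : c ++ "\n" ++ x ≠ "" := by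
  intro h
  have := congrArg String.length h
  simp [String.length_append] at this

theorem joinNL_cons_append (c b : String) (bs : List String) :
    joinNL ((c ++ "\n" ++ b) :: bs) = c ++ "\n" ++ joinNL (b :: bs) := by
  cases bs <;> simp [joinNL, String.append_assoc]

theorem lem2 (ls : List String) : ∀ (slides : List String) (cur : String), cur ≠ "" →
    finishA (ls.foldl fA (slides, cur)) =
      slides ++ joinNL (cur :: takeBody ls) :: goB (ls.drop (takeBody ls).length) := by
  induction ls with
  | nil => intro slides cur h; simp [finishA, joinNL, goB, takeBody, h]
  | cons x xs ih =>
    intro slides cur h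
    by_cases hx : PySem.Str.startswith x "Slide" = true
    · have hx' := startswith_ne_empty x hx
      simp at hx
      have e1 : fA (slides, cur) x = (slides ++ [cur], x) := by simp [fA, hx, h]
      rw [List.foldl_cons, e1, ih (slides ++ [cur]) x hx']
      simp [takeBody, hx, goB, joinNL, List.append_assoc]
    · simp at hx
      have e1 : fA (slides, cur) x = (slides, cur ++ "\n" ++ x) := by simp [fA, hx, h]
      rw [List.foldl_cons, e1, ih slides (cur ++ "\n" ++ x) (appendNL_ne_empty cur x)]
      simp [takeBody, hx, joinNL, joinNL_cons_append]

theorem lem1 (ls : List String) : ∀ (slides : List String),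
    finishA (ls.foldl fA (slides, "")) = slides ++ goB ls := by
  induction ls with
  | nil => intro slides; simp [finishA, goB]
  | cons x xs ih =>
    intro slides
    by_cases hx : PySem.Str.startswith x "Slide" = true
    · have hx' := startswith_ne_empty x hx
      simp at hx
      have e1 : fA (slides, "") x = (slides, x) := by simp [fA, hx]
      rw [List.foldl_cons, e1, lem2 xs slides x hx']
      simp [goB, hx]
    · simp at hx
      have e1 : fA (slides, "") x = (slides, "") := by simp [fA, hx]
      rw [List.foldl_cons, e1, ih slides]
      simp [goB, hx]

-- ===== VERDICT (by name: the statement is the Claim_ definition above) =====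
theorem extract_slides_spec : Claim_equal_extract_slides := by
  intro text _
  show extract_slides text = extract_slides_alt text
  have := lem1 ((PySem.Str.split? text "\n").getD []) []
  simpa [extract_slides, extract_slides_alt, finishA] using this
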